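-- pv_equiv track=rewrite | github.com/zubecm/RGB | RGB.py | rgb
-- ===== SOURCE A (Python) =====
-- def rgb(r, g, b):
--     red=''
--     green=''
--     blue=''
--     ans=''
--     h='0123456789ABCDEF'
--     if r>=255:
--         red='FF'
--     elif r<=0:
--         red="00"
--     else:
--         while r>0:
--             red=h[r%16]+red
--             r//=16
--     if len(red)==1:
--         red='0'+red
--     if g>=255:
--         green='FF'
--     elif g<=0:
--         green="00"
--     else:
--         while g>0:
--             green=h[g%16]+green
--             g//=16
--     if len(green)==1:
--         green='0'+green
--     if b>=255:
--         blue='FF'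
--     elif b<=0:
--         blue="00"
--     else:
--         while b>0:
--             blue=h[b%16]+blue
--             b//=16
--     if len(blue)==1:
--         blue='0'+blue
--     ans=red+green+blue
--     return(ans)
-- ===== SOURCE B (Python) =====
-- def rgb(r, g, b):
--     return ''.join('{:02X}'.format(max(0, min(255, c))) for c in (r, g, b))
-- ===== Notes on version B (the rewrite author's own statement) =====
-- stated objective: idiomatic
-- what changed: Replaces the three manual base-16 while-loops with hex-table lookups and single-digit padding by a per-channel clamp max(0,min(255,c)) formatted with '{:02X}'.
import Mathlib
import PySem

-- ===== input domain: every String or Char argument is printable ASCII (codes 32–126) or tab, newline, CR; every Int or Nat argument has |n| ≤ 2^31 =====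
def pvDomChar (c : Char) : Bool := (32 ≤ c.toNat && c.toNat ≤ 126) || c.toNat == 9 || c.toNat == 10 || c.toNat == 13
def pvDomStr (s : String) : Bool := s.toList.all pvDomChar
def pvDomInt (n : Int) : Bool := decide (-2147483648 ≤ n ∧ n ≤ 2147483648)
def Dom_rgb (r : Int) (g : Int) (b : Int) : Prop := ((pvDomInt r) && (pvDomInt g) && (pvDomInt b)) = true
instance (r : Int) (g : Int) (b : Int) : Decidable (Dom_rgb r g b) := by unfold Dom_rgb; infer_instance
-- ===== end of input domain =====

-- B replaces A's manual base-16 digit loops and padding by clamp-then-two-hex-digit formatting (idiomatic).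


-- ===== PORT A =====
-- A's 'while c>0: s = h[c%16]+s; c//=16' loop; PySem.List.pyGetD's default is never
-- used since 0 ≤ c%16 < 16 whenever the loop body runs.
-- (fuel = c.toNat makes the recursion structural; c//16 < c whenever 0 < c, so the
-- fuel never runs out and the guard is purely a totality device)
def rgbLoop : Nat → Int → List Char → List Char
  | 0, _, acc => acc
  | fuel + 1, c, acc =>
    if 0 < c then
      rgbLoop fuel (PySem.Int.floordiv c 16)
        (PySem.List.pyGetD "0123456789ABCDEF".toList (PySem.Int.mod c 16) ' ' :: acc)
    else acc

-- A's per-channel code (written three times in A, identically for r, g, b)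
def rgbChan (c : Int) : List Char :=
  let s := if c ≥ 255 then ['F', 'F']
           else if c ≤ 0 then ['0', '0']
           else rgbLoop c.toNat c []
  if s.length == 1 then '0' :: s else s

def rgb (r : Int) (g : Int) (b : Int) : String :=
  String.mk (rgbChan r ++ rgbChan g ++ rgbChan b)

-- ===== PORT B =====
-- B: clamp each channel to [0,255], then format it as two uppercase hex digits ('{:02X}')
def hexDig (n : Nat) : Char := "0123456789ABCDEF".toList.getD n '0'

def fmtChan (c : Int) : List Char :=
  let n := (max 0 (min 255 c)).toNat
  [hexDig (n / 16), hexDig (n % 16)]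

def rgb_alt (r : Int) (g : Int) (b : Int) : String :=
  String.mk (fmtChan r ++ fmtChan g ++ fmtChan b)

-- ===== PRECONDITION & SPEC =====
def Spec_rgb (r : Int) (g : Int) (b : Int) (out : String) : Prop := out = rgb_alt r g b
instance (r : Int) (g : Int) (b : Int) (out : String) : Decidable (Spec_rgb r g b out) := by unfold Spec_rgb; infer_instance

-- ===== CLAIM (what is proved, stated in full; the proofs are below) =====
def Claim_equal_rgb : Prop := ∀ (r : Int) (g : Int) (b : Int), Dom_rgb r g b → Spec_rgb r g b (rgb r g b)

-- ===== LEMMAS AND PROOFS =====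
lemma chan_eq (c : Int) : rgbChan c = fmtChan c := by
  by_cases h1 : c ≥ 255
  · have h2 : max 0 (min 255 c) = 255 := by omega
    simp [rgbChan, fmtChan, h1, h2]
    decide
  · by_cases h2 : c ≤ 0
    · have h3 : max 0 (min 255 c) = 0 := by omega
      simp [rgbChan, fmtChan, h1, h2, h3]
      decide
    · have hlo : 1 ≤ c := by omega
      have hhi : c ≤ 254 := by omega
      interval_cases c <;> decide

-- ===== VERDICT (by name: the statement is the Claim_ definition above) =====
theorem rgb_spec : Claim_equal_rgb := by
  intro r g b _
  show rgb r g b = rgb_alt r g b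
  simp [rgb, rgb_alt, chan_eq]
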